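-- pv_equiv track=rewrite | github.com/phzwart/sbdatacore | sbdatacore/parse_udb.py | inverse_search
-- ===== SOURCE A (Python) =====
-- def inverse_search(user_bd, item):
--     """
--     Performs an inverse search in the user database dictionary to find the key for a given item.
--     Raises an error if the item is found in more than one key's list.
--
--     Args:
--     user_bd (dict): The user database dictionary.
--     item (str): The item to search for in the values of the dictionary.
--
--     Returns:
--     str: The key corresponding to the found item.
--
--     Raises:
--     ValueError: If the item is not found or found in multiple keys.
--     """
--     found_key = None
--
--     for key, values in user_bd.items():
--         if item in values:
--             if found_key is not None:  # Item found in another key's list already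
--                 raise ValueError(f"Item '{item}' is not uniquely associated with a single key.")
--             found_key = key
--
--     if found_key is None:
--         raise ValueError(f"Item '{item}' not found in any key.")
--
--     return found_key
-- ===== SOURCE B (Python) =====
-- def inverse_search(user_bd, item):
--     # Build an inverted index item -> list of keys whose value list contains it,
--     # then answer with one lookup.
--     index = {}
--     for key, values in user_bd.items():
--         for x in set(values):
--             index.setdefault(x, []).append(key)
--     matches = index.get(item, [])
--     if len(matches) == 0:
--         raise ValueError(f"Item '{item}' not found in any key.")
--     if len(matches) > 1:
--         raise ValueError(f"Item '{item}' is not uniquely associated with a single key.")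
--     return matches[0]
-- ===== Notes on version B (the rewrite author's own statement) =====
-- stated objective: alternative
-- what changed: Replaces A's single scan with a stateful found_key and inline raises by building an inverted index (item -> keys) over the whole database and deciding from one dictionary lookup; no membership test of item against any value list is performed.
import Mathlib
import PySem

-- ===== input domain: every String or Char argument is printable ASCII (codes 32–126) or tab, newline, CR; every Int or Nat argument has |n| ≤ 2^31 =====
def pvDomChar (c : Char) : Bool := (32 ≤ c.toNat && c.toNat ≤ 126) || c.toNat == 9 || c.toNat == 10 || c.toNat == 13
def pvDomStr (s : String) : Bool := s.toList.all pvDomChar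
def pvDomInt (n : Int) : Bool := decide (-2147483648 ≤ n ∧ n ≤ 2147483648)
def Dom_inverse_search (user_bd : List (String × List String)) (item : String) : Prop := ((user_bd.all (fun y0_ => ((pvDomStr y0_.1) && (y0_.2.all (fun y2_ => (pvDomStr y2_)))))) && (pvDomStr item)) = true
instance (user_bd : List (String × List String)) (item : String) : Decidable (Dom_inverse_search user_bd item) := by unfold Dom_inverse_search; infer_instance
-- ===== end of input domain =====

-- B replaces A's stateful found_key scan by building an inverted index (item -> keys) and
-- deciding from one lookup (objective: alternative; same cost).
-- Both Pythons raise ValueError unless exactly one key's list contains the item; Pre_ admits exactly the non-raising inputs.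

-- ===== PORT A =====
-- A's loop: carries found_key (Option String); none as the loop RESULT encodes the ValueError raise
-- (raised either mid-loop on a second match, or after the loop when nothing matched).
def pvAFind (item : String) : List (String × List String) → Option String → Option String
  | [], found => found
  | (key, values) :: rest, found =>
      if values.contains item then
        match found with
        | some _ => none            -- raise ValueError: not uniquely associated
        | none => pvAFind item rest (some key)
      else
        pvAFind item rest found

def inverse_search (user_bd : List (String × List String)) (item : String) : String :=
  (pvAFind item user_bd none).getD ""   -- "" only on the raise paths, excluded by Pre_

-- ===== PORT B =====
-- the inverted index: for each pair, for each distinct element x of its value list,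
-- index[x] = index.get(x, []) + [key]   (Python: index.setdefault(x, []).append(key))
def pvIndex (user_bd : List (String × List String)) : PySem.Dict String (List String) :=
  user_bd.foldl
    (fun d p => (PySem.Set.ofList p.2).foldl (fun d x => d.modify x [] (· ++ [p.1])) d)
    PySem.Dict.empty

def inverse_search_alt (user_bd : List (String × List String)) (item : String) : String :=
  let ms := (pvIndex user_bd).getD item []
  if ms.length = 0 then ""        -- raise ValueError: not found (excluded by Pre_)
  else if 1 < ms.length then ""   -- raise ValueError: not unique (excluded by Pre_)
  else ms.headD ""

-- ===== PRECONDITION & SPEC =====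
-- Exactly the inputs on which Python A returns (no ValueError): exactly one entry whose value list contains item.
def Pre_inverse_search (user_bd : List (String × List String)) (item : String) : Prop :=
  user_bd.countP (fun p => p.2.contains item) = 1
instance (user_bd : List (String × List String)) (item : String) : Decidable (Pre_inverse_search user_bd item) := by unfold Pre_inverse_search; infer_instance

def pvWitness_inverse_search : (List (String × List String)) × String := ([("alice", ["x", "y"]), ("bob", ["z"])], "x")

def Spec_inverse_search (user_bd : List (String × List String)) (item : String) (out : String) : Prop := out = inverse_search_alt user_bd item
instance (user_bd : List (String × List String)) (item : String) (out : String) : Decidable (Spec_inverse_search user_bd item out) := by unfold Spec_inverse_search; infer_instance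

-- ===== CLAIM (what is proved, stated in full; the proofs are below) =====
def Claim_equal_inverse_search : Prop := ∀ (user_bd : List (String × List String)) (item : String), Dom_inverse_search user_bd item → Pre_inverse_search user_bd item → Spec_inverse_search user_bd item (inverse_search user_bd item)

-- ===== LEMMAS AND PROOFS =====

-- proof-only notion: the keys whose value list contains item, in database order
def pvMatches (item : String) (user_bd : List (String × List String)) : List String :=
  user_bd.filterMap (fun p => if p.2.contains item then some p.1 else none)

theorem pvMatches_cons (item k' : String) (vs : List String) (tl : List (String × List String)) :
    pvMatches item ((k', vs) :: tl) =
      if vs.contains item then k' :: pvMatches item tl else pvMatches item tl := by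
  by_cases h : item ∈ vs <;> simp [pvMatches, h]

-- If some later entry matches, A's loop with found_key already set raises (returns none);
-- if nothing later matches, it returns the carried key.
theorem pvAFind_some (item : String) (l : List (String × List String)) (k : String) :
    pvAFind item l (some k) = if pvMatches item l = [] then some k else none := by
  induction l with
  | nil => simp [pvAFind, pvMatches]
  | cons hd tl ih =>
      obtain ⟨k', vs⟩ := hd
      rw [pvMatches_cons]
      by_cases h : item ∈ vs
      · simp [pvAFind, h]
      · simp [pvAFind, h, ih]

-- A's loop from the initial state returns the unique match, none otherwise.
theorem pvAFind_none (item : String) (l : List (String × List String)) :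
    pvAFind item l none =
      match pvMatches item l with
      | [k] => some k
      | _ => none := by
  induction l with
  | nil => simp [pvAFind, pvMatches]
  | cons hd tl ih =>
      obtain ⟨k', vs⟩ := hd
      rw [pvMatches_cons]
      by_cases h : item ∈ vs
      · simp only [pvAFind, List.contains_eq_mem, h, decide_true, if_pos]
        rw [pvAFind_some item tl k']
        cases hm : pvMatches item tl with
        | nil => simp
        | cons a r => simp
      · simp [pvAFind, h, ih]

-- Posting one key k under every distinct element of a nodup list S appends k to item's
-- bucket exactly when item ∈ S, and touches item's bucket in no other way.
theorem pvPost_bucket (item k : String) (S : List String) (d : PySem.Dict String (List String))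
    (hnd : S.Nodup) :
    (S.foldl (fun d x => d.modify x [] (· ++ [k])) d).getD item [] =
      d.getD item [] ++ (if item ∈ S then [k] else []) := by
  induction S generalizing d with
  | nil => simp
  | cons x S' ih =>
      rcases List.nodup_cons.mp hnd with ⟨hx, hnd'⟩
      by_cases hxi : x = item
      · subst hxi
        have hni : x ∉ S' := hx
        simp [List.foldl_cons, ih _ hnd', hni, PySem.Dict.getD_modify_self]
      · have hne : item ≠ x := fun h => hxi h.symm
        simp [List.foldl_cons, ih _ hnd', PySem.Dict.getD_modify_of_ne, hne]

-- The inverted index's bucket for item is exactly the ordered list of matching keys.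
theorem pvIndex_bucket_aux (item : String) (l : List (String × List String))
    (d : PySem.Dict String (List String)) :
    (l.foldl
      (fun d p => (PySem.Set.ofList p.2).foldl (fun d x => d.modify x [] (· ++ [p.1])) d)
      d).getD item [] = d.getD item [] ++ pvMatches item l := by
  induction l generalizing d with
  | nil => simp [pvMatches]
  | cons hd tl ih =>
      obtain ⟨k', vs⟩ := hd
      rw [pvMatches_cons, List.foldl_cons, ih,
        pvPost_bucket item k' _ d (PySem.Set.nodup_ofList vs)]
      by_cases h : item ∈ vs <;> simp [h, PySem.Set.mem_ofList]

theorem pvIndex_bucket (item : String) (l : List (String × List String)) :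
    (pvIndex l).getD item [] = pvMatches item l := by
  simp [pvIndex, pvIndex_bucket_aux]

theorem countP_eq_matches_length (item : String) (l : List (String × List String)) :
    l.countP (fun p => p.2.contains item) = (pvMatches item l).length := by
  induction l with
  | nil => rfl
  | cons hd tl ih =>
      obtain ⟨k', vs⟩ := hd
      rw [pvMatches_cons]
      simp only [List.contains_eq_mem] at ih
      by_cases h : item ∈ vs <;> simp [h, ih]

-- ===== VERDICT (by name: the statement is the Claim_ definition above) =====
theorem inverse_search_spec : Claim_equal_inverse_search := by
  intro user_bd item _ hpre
  unfold Spec_inverse_search inverse_search inverse_search_alt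
  have hlen : (pvMatches item user_bd).length = 1 := by
    rw [← countP_eq_matches_length]; exact hpre
  obtain ⟨k, hk⟩ := List.length_eq_one_iff.mp hlen
  rw [pvAFind_none, pvIndex_bucket, hk]
  simp
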